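-- pv_equiv track=rewrite | github.com/twinstarhub/profile-search-engine | apps/common/generator.py | long_name
-- ===== SOURCE A (Python) =====
-- def long_name(splitName):
--     long_name_list= []
--     total = pow(2, len(splitName))
--     for i in range(1, total):
--         newString = str(bin(i))[2:]
--         newString = newString.zfill(len(splitName))
--         newString = newString[::-1]
--         newname = []
--
--         if newString.count("1") < 5 and newString.count("1") > 1:
--             for j in range(len(newString)):
--                 if newString[j] == "1":
--                     newname.append(splitName[j])
--             long_name_list.append(newname)
--     return long_name_list
-- ===== SOURCE B (Python) =====
-- def long_name(splitName):
--     n = len(splitName)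
--     # every 2/3/4-element subset, tagged with its bitmask
--     pairs = [((1 << i) + (1 << j), [splitName[i], splitName[j]])
--              for i in range(n) for j in range(i + 1, n)]
--     pairs += [((1 << i) + (1 << j) + (1 << k),
--                [splitName[i], splitName[j], splitName[k]])
--               for i in range(n) for j in range(i + 1, n) for k in range(j + 1, n)]
--     pairs += [((1 << i) + (1 << j) + (1 << k) + (1 << l),
--                [splitName[i], splitName[j], splitName[k], splitName[l]])
--               for i in range(n) for j in range(i + 1, n) for k in range(j + 1, n)
--               for l in range(k + 1, n)]
--     pairs.sort(key=lambda p: p[0])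
--     return [p[1] for p in pairs]
-- ===== Notes on version B (the rewrite author's own statement) =====
-- stated objective: faster
-- what changed: Instead of scanning all 2^n bitmasks and decoding each through a binary string, B enumerates only the size-2/3/4 index combinations recursively and sorts them by their bitmask integer value.
import Mathlib
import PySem

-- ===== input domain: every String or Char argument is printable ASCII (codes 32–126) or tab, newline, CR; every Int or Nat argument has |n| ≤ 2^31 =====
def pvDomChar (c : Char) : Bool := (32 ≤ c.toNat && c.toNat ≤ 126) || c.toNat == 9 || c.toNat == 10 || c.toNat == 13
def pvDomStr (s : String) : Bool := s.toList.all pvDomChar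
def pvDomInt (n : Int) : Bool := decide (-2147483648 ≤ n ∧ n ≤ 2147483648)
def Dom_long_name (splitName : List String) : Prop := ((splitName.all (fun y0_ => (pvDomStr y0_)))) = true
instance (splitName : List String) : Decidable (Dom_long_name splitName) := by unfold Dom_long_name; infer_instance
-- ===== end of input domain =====

-- B enumerates only the size-2/3/4 index combinations and sorts them by bitmask value
-- instead of scanning all 2^n bitmasks through binary strings (objective: faster).

-- ===== PORT A =====
def long_name (splitName : List String) : List (List String) :=
  let total : Int := (2 : Int) ^ splitName.length
  (PySem.List.pyRange 1 total 1).foldl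
    (fun acc i =>
      -- newString = str(bin(i))[2:]
      let s1 := PySem.List.slice (PySem.Int.toBinChars0b i) (some 2) none
      -- newString = newString.zfill(len(splitName))
      let s2 := PySem.Chars.zfill s1 (PySem.List.len splitName)
      -- newString = newString[::-1]   (step -1 never raises, so getD is exact)
      let s3 := (PySem.Chars.slice? s2 none none (-1)).getD s2
      if PySem.Chars.count s3 ['1'] < 5 ∧ PySem.Chars.count s3 ['1'] > 1 then
        acc ++ [(PySem.List.pyRange 0 (PySem.List.len s3) 1).foldl
          (fun newname j =>
            if PySem.List.pyGetD s3 j ' ' = '1' then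
              newname ++ [PySem.List.pyGetD splitName j ""]
            else newname) []]
      else acc) []

-- ===== PORT B =====
def long_name_alt (splitName : List String) : List (List String) :=
  let n := PySem.List.len splitName
  -- pairs = [((1 << i) + (1 << j), [splitName[i], splitName[j]]) for i in range(n) for j in range(i+1, n)]
  let pairs2 : List (Int × List String) :=
    (PySem.List.pyRange 0 n 1).flatMap (fun i =>
      (PySem.List.pyRange (i + 1) n 1).map (fun j =>
        ((1 : Int) <<< i + (1 : Int) <<< j,
         [PySem.List.pyGetD splitName i "", PySem.List.pyGetD splitName j ""])))
  -- pairs += [... for i ... for j ... for k ...]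
  let pairs3 : List (Int × List String) :=
    (PySem.List.pyRange 0 n 1).flatMap (fun i =>
      (PySem.List.pyRange (i + 1) n 1).flatMap (fun j =>
        (PySem.List.pyRange (j + 1) n 1).map (fun k =>
          ((1 : Int) <<< i + (1 : Int) <<< j + (1 : Int) <<< k,
           [PySem.List.pyGetD splitName i "", PySem.List.pyGetD splitName j "",
            PySem.List.pyGetD splitName k ""]))))
  -- pairs += [... for i ... for j ... for k ... for l ...]
  let pairs4 : List (Int × List String) :=
    (PySem.List.pyRange 0 n 1).flatMap (fun i =>
      (PySem.List.pyRange (i + 1) n 1).flatMap (fun j =>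
        (PySem.List.pyRange (j + 1) n 1).flatMap (fun k =>
          (PySem.List.pyRange (k + 1) n 1).map (fun l =>
            ((1 : Int) <<< i + (1 : Int) <<< j + (1 : Int) <<< k + (1 : Int) <<< l,
             [PySem.List.pyGetD splitName i "", PySem.List.pyGetD splitName j "",
              PySem.List.pyGetD splitName k "", PySem.List.pyGetD splitName l ""])))))
  -- pairs.sort(key=lambda p: p[0]); return [p[1] for p in pairs]
  (PySem.List.sorted (pairs2 ++ pairs3 ++ pairs4) (fun p => p.1) false).map (fun p => p.2)

-- ===== PRECONDITION & SPEC =====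
def Spec_long_name (splitName : List String) (out : List (List String)) : Prop := out = long_name_alt splitName
instance (splitName : List String) (out : List (List String)) : Decidable (Spec_long_name splitName out) := by unfold Spec_long_name; infer_instance

-- ===== CLAIM (what is proved, stated in full; the proofs are below) =====
def Claim_equal_long_name : Prop := ∀ (splitName : List String), Dom_long_name splitName → Spec_long_name splitName (long_name splitName)

-- ===== LEMMAS AND PROOFS =====

-- all strictly-increasing k-element sublists of idxs, lexicographic
def pvCombos : List Nat → Nat → List (List Nat)
  | _, 0 => [[]]
  | [], _ + 1 => []
  | j :: rest, k + 1 => (pvCombos rest k).map (j :: ·) ++ pvCombos rest (k + 1)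

def pvMask (c : List Nat) : Int := (c.map (fun j : Nat => (1 : Int) <<< j)).sum

-- the binary digits of m, least significant first ([] for 0)
def lsbBits : Nat → List Char
  | 0 => []
  | m + 1 => (if (m + 1) % 2 = 1 then '1' else '0') :: lsbBits ((m + 1) / 2)
decreasing_by omega

-- the n low bits of m as chars, LSB first
def bitChars (m n : Nat) : List Char :=
  (List.range n).map (fun j => if m.testBit j then '1' else '0')

-- indices of set bits of m below n, increasing
def idxOf (m n : Nat) : List Nat := (List.range n).filter (fun j => m.testBit j)

-- popcount of the n low bits
def pc (m n : Nat) : Nat := ((List.range n).filter (fun j => m.testBit j)).length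

-- the Nat bitmask of an index list
def maskN (c : List Nat) : Nat := (c.map (2 ^ ·)).sum

def subF (splitName : List String) (m : Nat) : List String :=
  (idxOf m splitName.length).map (fun j => splitName.getD j "")

def goodMasks (n : Nat) : List Nat :=
  (List.range (2 ^ n)).filter (fun m => decide (pc m n < 5 ∧ pc m n > 1))

lemma lsb_toDigitsCore (f : Nat) : ∀ n acc, 1 ≤ n → n ≤ f →
    Nat.toDigitsCore 2 f n acc = (lsbBits n).reverse ++ acc := by
  induction f with
  | zero => intro n acc h1 h2; omega
  | succ f ih =>
    intro n acc h1 h2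
    obtain ⟨m, rfl⟩ : ∃ m, n = m + 1 := ⟨n - 1, by omega⟩
    rw [Nat.toDigitsCore]
    by_cases hz : (m + 1) / 2 = 0
    · have hm : m = 0 := by omega
      subst hm
      simp [hz, lsbBits, Nat.digitChar]
    · rw [if_neg hz, ih ((m+1)/2) _ (by omega) (by omega)]
      rw [lsbBits]
      have hmod : (m + 1) % 2 = 1 ∨ (m + 1) % 2 = 0 := by omega
      rcases hmod with h | h <;> simp [h, Nat.digitChar]

lemma toDigits_two (m : Nat) (h : 1 ≤ m) : Nat.toDigits 2 m = (lsbBits m).reverse := by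
  rw [Nat.toDigits, lsb_toDigitsCore (m+1) m [] h (by omega)]
  simp

lemma lsb_mem (m : Nat) : ∀ c ∈ lsbBits m, c = '0' ∨ c = '1' := by
  induction m using Nat.strong_induction_on with
  | _ m ih =>
    match m with
    | 0 => simp [lsbBits]
    | m + 1 =>
      rw [lsbBits]
      intro c hc
      rcases List.mem_cons.mp hc with h | h
      · split at h <;> simp [h]
      · exact ih ((m+1)/2) (by omega) c h

lemma lsb_len_le (n : Nat) : ∀ m, m < 2 ^ n → (lsbBits m).length ≤ n := by
  induction n with
  | zero => intro m h; interval_cases m; simp [lsbBits]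
  | succ n ih =>
    intro m h
    match m with
    | 0 => simp [lsbBits]
    | m + 1 =>
      rw [lsbBits]
      simp only [List.length_cons]
      have := ih ((m+1)/2) (by omega)
      omega

lemma lsb_pad (n : Nat) : ∀ m, m < 2 ^ n →
    lsbBits m ++ List.replicate (n - (lsbBits m).length) '0' = bitChars m n := by
  induction n with
  | zero =>
    intro m h; interval_cases m; simp [lsbBits, bitChars]
  | succ n ih =>
    intro m h
    have hstep : bitChars m (n+1)
        = (if m % 2 = 1 then '1' else '0') :: bitChars (m / 2) n := by
      rw [bitChars, List.range_succ_eq_map]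
      simp only [List.map_cons, List.map_map]
      congr 1
      · rw [Nat.testBit_zero]; rcases Nat.mod_two_eq_zero_or_one m with h | h <;> simp [h]
      · rw [bitChars]
        apply List.map_congr_left
        intro j hj
        simp only [Function.comp]
        rw [Nat.testBit_succ]
    match m with
    | 0 =>
      simp only [lsbBits, List.nil_append, List.length_nil, Nat.sub_zero]
      rw [hstep]
      have h0 : bitChars 0 n = List.replicate n '0' := by
        rw [bitChars]
        simp [List.map_const']
      rw [h0]
      norm_num [List.replicate_succ]
    | m + 1 =>
      rw [lsbBits, hstep]
      simp only [List.cons_append, List.length_cons]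
      have hlen := lsb_len_le n ((m+1)/2) (by omega) -- not needed maybe
      congr 1
      have := ih ((m+1)/2) (by omega)
      simpa using this

lemma zfill_eq (cs : List Char) (n : Nat)
    (hhead : ∀ c, cs.head? = some c → c ≠ '+' ∧ c ≠ '-') (hlen : cs.length ≤ n) :
    PySem.Chars.zfill cs (n : Int) = List.replicate (n - cs.length) '0' ++ cs := by
  rw [PySem.Chars.zfill.eq_def]
  by_cases hle : (n : Int) ≤ (cs.length : Int)
  · rw [if_pos hle]
    have : n - cs.length = 0 := by omega
    simp [this]
  · rw [if_neg hle]
    match cs with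
    | [] => simp
    | c :: rest =>
      have hc := hhead c rfl
      show (if c = '+' ∨ c = '-' then c :: (List.replicate (((n:Int)).toNat - (c :: rest).length) '0' ++ rest)
            else List.replicate (((n:Int)).toNat - (c :: rest).length) '0' ++ c :: rest) = _
      rw [if_neg (by tauto)]
      congr 1

lemma count_go_one : ∀ fuel (l : List Char) acc, l.length ≤ fuel →
    PySem.Chars.count.go ['1'] fuel l acc = acc + l.count '1' := by
  intro fuel
  induction fuel with
  | zero =>
    intro l acc h
    have : l = [] := by cases l <;> simp_all
    subst this
    rw [PySem.Chars.count.go]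
    simp
  | succ fuel ih =>
    intro l acc h
    match l with
    | [] => rw [PySem.Chars.count.go]; simp; omega
    | c :: t =>
      rw [PySem.Chars.count.go]
      by_cases hc : c = '1'
      · subst hc
        rw [if_pos (by simp [List.isPrefixOf])]
        simp only [List.length_cons] at h
        rw [show (List.drop ['1'].length ('1' :: t)) = t by simp]
        rw [ih t (acc+1) (by omega), List.count_cons]
        norm_num
        omega
      · rw [if_neg (by simp [List.isPrefixOf]; exact fun h => hc h.symm)]
        simp only [List.length_cons] at h
        rw [ih t acc (by omega), List.count_cons]
        simp [hc]

lemma count_one (l : List Char) : PySem.Chars.count l ['1'] = l.count '1' := by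
  rw [PySem.Chars.count]
  simp [count_go_one l.length l 0 le_rfl]

lemma count_bitChars (m n : Nat) : (bitChars m n).count '1' = pc m n := by
  rw [bitChars, pc, List.count_eq_countP, List.countP_map, List.countP_eq_length_filter]
  congr 1
  apply List.filter_congr
  intro j _
  by_cases h : m.testBit j <;> simp [h, Function.comp]

lemma s3_eq (m n : Nat) (h1 : 1 ≤ m) (h2 : m < 2 ^ n) :
    ((PySem.Chars.slice?
        (PySem.Chars.zfill
          (PySem.List.slice (PySem.Int.toBinChars0b ((m : Nat) : Int)) (some 2) none)
          ((n : Nat) : Int))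
        none none (-1)).getD
      (PySem.Chars.zfill
        (PySem.List.slice (PySem.Int.toBinChars0b ((m : Nat) : Int)) (some 2) none)
        ((n : Nat) : Int))) = bitChars m n := by
  have hbin : PySem.List.slice (PySem.Int.toBinChars0b ((m : Nat) : Int)) (some 2) none
      = (lsbBits m).reverse := by
    rw [PySem.Int.toBinChars0b]
    rw [if_neg (not_lt.mpr (Int.natCast_nonneg m))]
    rw [PySem.List.slice_from ('0' :: 'b' :: Nat.toDigits 2 ((m:Int)).toNat) (a := 2) (by norm_num)]
    simp [toDigits_two m h1]
  rw [hbin]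
  have hlen : (lsbBits m).reverse.length ≤ n := by
    simpa using lsb_len_le n m h2
  have hz : PySem.Chars.zfill (lsbBits m).reverse ((n:Int))
      = List.replicate (n - (lsbBits m).length) '0' ++ (lsbBits m).reverse := by
    rw [zfill_eq _ n ?_ hlen]
    · simp
    · intro c hc
      have : c ∈ (lsbBits m).reverse := List.mem_of_mem_head? hc
      rcases lsb_mem m c (by simpa using this) with h | h <;> subst h <;> exact ⟨by decide, by decide⟩
  rw [hz]
  rw [PySem.Chars.slice?]
  rw [PySem.List.slice?_none_none_neg_one]
  simp only [Option.getD_some]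
  rw [List.reverse_append, List.reverse_reverse, List.reverse_replicate]
  exact lsb_pad n m h2

lemma inner_eq (splitName : List String) (m : Nat) :
    (PySem.List.pyRange 0 (((bitChars m splitName.length).length : Nat) : Int) 1).foldl
      (fun newname j =>
        if PySem.List.pyGetD (bitChars m splitName.length) j ' ' = '1' then
          newname ++ [PySem.List.pyGetD splitName j ""]
        else newname) []
    = subF splitName m := by
  set n := splitName.length with hn
  have hlen : (bitChars m n).length = n := by simp [bitChars]
  rw [hlen]
  rw [PySem.List.pyRange_zero_natCast]
  rw [List.foldl_map]
  rw [PySem.List.foldl_congr_mem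
    (g := fun newname (k : Nat) => if m.testBit k then newname ++ [splitName.getD k ""] else newname)]
  · rw [PySem.List.foldl_append_if (fun k => m.testBit k) (fun k => splitName.getD k "")]
    simp [subF, idxOf]
    rfl
  · intro acc k hk
    have hkn : k < n := List.mem_range.mp hk
    rw [PySem.List.pyGetD_natCast, PySem.List.pyGetD_natCast]
    rw [List.getD_eq_getElem _ _ (by omega : k < (bitChars m n).length)]
    have : (bitChars m n)[k] = if m.testBit k then '1' else '0' := by
      simp [bitChars]
    rw [this]
    by_cases hb : m.testBit k <;> simp [hb]

lemma testBit_maskN (c : List Nat) (hp : c.Pairwise (· < ·)) (t : Nat) :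
    (maskN c).testBit t = decide (t ∈ c) := by
  induction c generalizing t with
  | nil => simp [maskN]
  | cons j rest ih =>
    have hj : ∀ e ∈ rest, j < e := fun e he => (List.pairwise_cons.mp hp).1 e he
    have hdvd : 2 ^ (j + 1) ∣ maskN rest := by
      apply List.dvd_sum
      intro x hx
      obtain ⟨e, he, rfl⟩ := List.mem_map.mp hx
      exact pow_dvd_pow 2 (hj e he)
    obtain ⟨q, hq⟩ := hdvd
    have hq' : (rest.map (2 ^ ·)).sum = 2 ^ (j + 1) * q := hq
    have hmask : maskN (j :: rest) = 2 ^ (j + 1) * q + 2 ^ j := by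
      rw [maskN, List.map_cons, List.sum_cons, hq']
      omega
    rw [hmask]
    rw [Nat.testBit_two_pow_mul_add q (Nat.pow_lt_pow_right one_lt_two (by omega)) t]
    by_cases ht : t < j + 1
    · rw [if_pos ht, Nat.testBit_two_pow]
      have : t ∈ j :: rest ↔ t = j := by
        constructor
        · intro h; rcases List.mem_cons.mp h with h | h
          · exact h
          · exact absurd (hj t h) (by omega)
        · intro h; simp [h]
      simp [this, eq_comm]
    · rw [if_neg ht]
      have hmrest : (maskN rest).testBit t = q.testBit (t - (j + 1)) := by
        rw [hq]
        have h3 := Nat.testBit_two_pow_mul_add q (b := 0) (i := j + 1) (by positivity) t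
        simpa [show ¬ t ≤ j from by omega] using h3
      rw [← hmrest, ih (List.pairwise_cons.mp hp).2 t]
      have : t ∈ j :: rest ↔ t ∈ rest := by
        simp only [List.mem_cons]
        constructor
        · rintro (h | h); · omega
          · exact h
        · tauto
      simp [this]

lemma maskN_lt (c : List Nat) (n : Nat) (hs : c.Sublist (List.range n)) : maskN c < 2 ^ n := by
  have hp : c.Pairwise (· < ·) := List.pairwise_lt_range.sublist hs
  have hmem : ∀ x ∈ c, x < n := fun x hx => List.mem_range.mp (hs.subset hx)
  apply Nat.lt_pow_two_of_testBit
  intro t ht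
  rw [testBit_maskN c hp t]
  simp only [decide_eq_false_iff_not]
  intro hc
  exact absurd (hmem t hc) (by omega)

lemma filter_mem_sublist : ∀ {l c : List Nat}, c.Sublist l → l.Nodup →
    l.filter (fun x => decide (x ∈ c)) = c := by
  intro l c hs
  induction hs with
  | slnil => intro _; simp
  | @cons c' l' a hs ih =>
    intro hnd
    have ha : a ∉ l' := (List.nodup_cons.mp hnd).1
    have hac : a ∉ c' := fun h => ha (hs.subset h)
    rw [List.filter_cons]
    simp only [hac, decide_false]
    exact ih (List.nodup_cons.mp hnd).2
  | @cons₂ c' l' a hs ih =>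
    intro hnd
    rw [List.filter_cons]
    simp only [List.mem_cons, true_or, decide_true, if_true]
    congr 1
    rw [List.filter_congr (q := fun x => decide (x ∈ c'))]
    · exact ih (List.nodup_cons.mp hnd).2
    · intro x hx
      have hxa : x ≠ a := fun h => (List.nodup_cons.mp hnd).1 (h ▸ hx)
      simp [hxa]

lemma idxOf_maskN (c : List Nat) (n : Nat) (hs : c.Sublist (List.range n)) :
    idxOf (maskN c) n = c := by
  have hp : c.Pairwise (· < ·) := List.pairwise_lt_range.sublist hs
  rw [idxOf]
  rw [List.filter_congr (q := fun x => decide (x ∈ c))]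
  · exact filter_mem_sublist hs List.nodup_range
  · intro x _
    exact testBit_maskN c hp x

lemma pc_maskN (c : List Nat) (n : Nat) (hs : c.Sublist (List.range n)) :
    pc (maskN c) n = c.length := by
  have := idxOf_maskN c n hs
  rw [idxOf] at this
  rw [pc, this]

lemma maskN_idxOf (m n : Nat) (h : m < 2 ^ n) : maskN (idxOf m n) = m := by
  have hp : (idxOf m n).Pairwise (· < ·) := List.pairwise_lt_range.sublist List.filter_sublist
  apply Nat.eq_of_testBit_eq
  intro t
  rw [testBit_maskN _ hp t]
  by_cases ht : t < n
  · simp [idxOf, List.mem_filter, List.mem_range, ht]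
  · have : m.testBit t = false := by
      apply Nat.testBit_eq_false_of_lt
      calc m < 2 ^ n := h
        _ ≤ 2 ^ t := Nat.pow_le_pow_right (by norm_num) (by omega)
    rw [this]
    simp [idxOf, List.mem_filter, List.mem_range]
    omega

lemma pvMask_eq (c : List Nat) : pvMask c = (maskN c : Int) := by
  induction c with
  | nil => simp [pvMask, maskN]
  | cons j c ih =>
    simp only [pvMask, maskN, List.map_cons, List.sum_cons] at *
    rw [ih]
    push_cast
    rw [Int.shiftLeft_eq]
    ring

lemma mem_pvCombos (c : List Nat) : ∀ idxs k, (c ∈ pvCombos idxs k ↔ c.Sublist idxs ∧ c.length = k) := by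
  intro idxs
  induction idxs generalizing c with
  | nil =>
    intro k
    match k with
    | 0 => simp [pvCombos, List.sublist_nil]
      -- c ∈ [[]] ↔ c <+ [] ∧ len = 0
    | k + 1 => simp [pvCombos]; intro h hl; subst h; simp at hl
  | cons j rest ih =>
    intro k
    match k with
    | 0 =>
      simp only [pvCombos, List.mem_singleton]
      constructor
      · rintro rfl; exact ⟨List.nil_sublist _, rfl⟩
      · rintro ⟨_, hl⟩; exact List.length_eq_zero_iff.mp hl
    | k + 1 =>
      simp only [pvCombos, List.mem_append, List.mem_map]
      constructor
      · rintro (⟨c', hc', rfl⟩ | h)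
        · obtain ⟨hs, hl⟩ := (ih c' k).mp hc'
          exact ⟨List.cons_sublist_cons.mpr hs, by simp [hl]⟩
        · obtain ⟨hs, hl⟩ := (ih c (k+1)).mp h
          exact ⟨hs.trans (List.sublist_cons_self j rest), hl⟩
      · rintro ⟨hs, hl⟩
        cases c with
        | nil => simp at hl
        | cons x c' =>
          cases hs with
          | cons _ hs' =>
            right
            exact (ih (x :: c') (k+1)).mpr ⟨hs', hl⟩
          | cons₂ _ hs' =>
            left
            exact ⟨c', (ih c' k).mpr ⟨hs', by simpa using hl⟩, rfl⟩

lemma nodup_pvCombos (idxs : List Nat) (k : Nat) (hnd : idxs.Nodup) : (pvCombos idxs k).Nodup := by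
  induction idxs generalizing k with
  | nil => match k with
    | 0 => simp [pvCombos]
    | k + 1 => simp [pvCombos]
  | cons j rest ih =>
    match k with
    | 0 => simp [pvCombos]
    | k + 1 =>
      rw [pvCombos]
      apply List.Nodup.append
      · exact (ih k (List.nodup_cons.mp hnd).2).map (fun a b h => by simpa using h)
      · exact ih (k+1) (List.nodup_cons.mp hnd).2
      · intro x hx1 hx2
        obtain ⟨c', hc', rfl⟩ := List.mem_map.mp hx1
        have hs := ((mem_pvCombos _ rest (k+1)).mp hx2).1
        have : j ∈ rest := hs.subset (by simp)
        exact (List.nodup_cons.mp hnd).1 this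

lemma pc_zero (n : Nat) : pc 0 n = 0 := by
  simp [pc, Nat.zero_testBit]

lemma A_eq (splitName : List String) :
    long_name splitName = (goodMasks splitName.length).map (subF splitName) := by
  simp only [long_name, PySem.List.len_eq]
  have h2n : ((2:Int) ^ splitName.length) = ((2 ^ splitName.length : Nat) : Int) := by
    push_cast; ring
  rw [h2n, PySem.List.pyRange_one]
  have ht : (((2 ^ splitName.length : Nat) : Int) - 1).toNat = 2 ^ splitName.length - 1 := by
    have := Nat.one_le_two_pow (n := splitName.length)
    omega
  rw [ht, List.foldl_map]
  rw [PySem.List.foldl_congr_mem _ _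
    (fun acc (k : Nat) =>
      if decide (pc (k+1) splitName.length < 5 ∧ pc (k+1) splitName.length > 1) = true then
        acc ++ [subF splitName (k+1)]
      else acc) _ ?hbody]
  case hbody =>
    intro acc k hk
    have hkn : k < 2 ^ splitName.length - 1 := List.mem_range.mp hk
    have hge := Nat.one_le_two_pow (n := splitName.length)
    have hc : (1:Int) + (k:Int) = (((k+1 : Nat)) : Int) := by push_cast; ring
    rw [hc]
    simp only [s3_eq (k+1) splitName.length (by omega) (by omega), count_one, count_bitChars,
      inner_eq splitName (k+1)]
    by_cases hp : (pc (k+1) splitName.length < 5 ∧ pc (k+1) splitName.length > 1) <;>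
      simp [hp]
  rw [PySem.List.foldl_append_if]
  have hgm : goodMasks splitName.length
      = ((List.range (2 ^ splitName.length - 1)).filter
          (fun k => decide (pc (k+1) splitName.length < 5 ∧ pc (k+1) splitName.length > 1))).map
          (· + 1) := by
    rw [goodMasks]
    rw [show (2:Nat) ^ splitName.length = (2 ^ splitName.length - 1) + 1 by
      have := Nat.one_le_two_pow (n := splitName.length); omega]
    rw [List.range_succ_eq_map, List.filter_cons]
    simp only [pc_zero]
    norm_num
    rw [List.filter_map]
    congr 1
  rw [hgm, List.map_map]
  simp

def gPair (splitName : List String) (c : List Nat) : Int × List String :=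
  (pvMask c, c.map (fun j => splitName.getD j ""))

lemma pyRange_cast (a n : Nat) :
    PySem.List.pyRange (a : Int) (n : Int) 1
      = (List.range' a (n - a)).map (fun x : Nat => (x : Int)) := by
  rw [PySem.List.pyRange_one, List.range'_eq_map_range, List.map_map]
  rw [show ((n : Int) - a).toNat = n - a by omega]
  apply List.map_congr_left
  intro k _
  simp

lemma E1 (l : List Nat) : pvCombos l 1 = l.map (fun x => [x]) := by
  induction l with
  | nil => rfl
  | cons x l ih => simp [pvCombos, ih]

lemma K2 (n : Nat) : ∀ m s, s + m = n →
    (List.range' s m).flatMap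
      (fun i => (List.range' (i+1) (n - (i+1))).map (fun j => [i, j]))
      = pvCombos (List.range' s m) 2 := by
  intro m
  induction m with
  | zero => intro s _; simp [pvCombos]
  | succ m ih =>
    intro s hs
    rw [List.range'_succ, List.flatMap_cons, pvCombos, ← ih (s+1) (by omega)]
    congr 1
    rw [E1, List.map_map]
    rw [show n - (s + 1) = m by omega]
    rfl

lemma K3 (n : Nat) : ∀ m s, s + m = n →
    (List.range' s m).flatMap
      (fun i => (List.range' (i+1) (n - (i+1))).flatMap
        (fun j => (List.range' (j+1) (n - (j+1))).map (fun k => [i, j, k])))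
      = pvCombos (List.range' s m) 3 := by
  intro m
  induction m with
  | zero => intro s _; simp [pvCombos]
  | succ m ih =>
    intro s hs
    rw [List.range'_succ, List.flatMap_cons, pvCombos, ← ih (s+1) (by omega)]
    congr 1
    rw [← K2 n m (s+1) (by omega), List.map_flatMap]
    rw [show n - (s + 1) = m by omega]
    apply List.flatMap_congr
    intro j _
    rw [List.map_map]
    rfl

lemma K4 (n : Nat) : ∀ m s, s + m = n →
    (List.range' s m).flatMap
      (fun i => (List.range' (i+1) (n - (i+1))).flatMap
        (fun j => (List.range' (j+1) (n - (j+1))).flatMap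
          (fun k => (List.range' (k+1) (n - (k+1))).map (fun l => [i, j, k, l]))))
      = pvCombos (List.range' s m) 4 := by
  intro m
  induction m with
  | zero => intro s _; simp [pvCombos]
  | succ m ih =>
    intro s hs
    rw [List.range'_succ, List.flatMap_cons, pvCombos, ← ih (s+1) (by omega)]
    congr 1
    rw [← K3 n m (s+1) (by omega), List.map_flatMap]
    rw [show n - (s + 1) = m by omega]
    apply List.flatMap_congr
    intro j _
    rw [List.map_flatMap]
    apply List.flatMap_congr
    intro k _
    rw [List.map_map]
    rfl

lemma castsucc (x : Nat) : (x : Int) + 1 = ((x + 1 : Nat) : Int) := by push_cast; ring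

lemma B_eq (splitName : List String) :
    long_name_alt splitName = (goodMasks splitName.length).map (subF splitName) := by
  set n := splitName.length with hn
  have hp2 : (PySem.List.pyRange 0 (n : Int) 1).flatMap (fun i =>
      (PySem.List.pyRange (i + 1) (n : Int) 1).map (fun j =>
        ((1 : Int) <<< i + (1 : Int) <<< j,
         [PySem.List.pyGetD splitName i "", PySem.List.pyGetD splitName j ""])))
      = (pvCombos (List.range n) 2).map (gPair splitName) := by
    rw [show ((0:Int)) = ((0:Nat) : Int) by norm_num, pyRange_cast 0 n, List.flatMap_map,
        Nat.sub_zero, List.range_eq_range', ← K2 n n 0 (by omega), List.map_flatMap]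
    apply List.flatMap_congr
    intro i _
    rw [castsucc, pyRange_cast (i+1) n, List.map_map, List.map_map]
    apply List.map_congr_left
    intro j _
    simp [gPair, pvMask, Int.shiftLeft_eq', Int.one_shiftLeft, List.getD]
    try push_cast
    try ring
  have hp3 : (PySem.List.pyRange 0 (n : Int) 1).flatMap (fun i =>
      (PySem.List.pyRange (i + 1) (n : Int) 1).flatMap (fun j =>
        (PySem.List.pyRange (j + 1) (n : Int) 1).map (fun k =>
          ((1 : Int) <<< i + (1 : Int) <<< j + (1 : Int) <<< k,
           [PySem.List.pyGetD splitName i "", PySem.List.pyGetD splitName j "",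
            PySem.List.pyGetD splitName k ""]))))
      = (pvCombos (List.range n) 3).map (gPair splitName) := by
    rw [show ((0:Int)) = ((0:Nat) : Int) by norm_num, pyRange_cast 0 n, List.flatMap_map,
        Nat.sub_zero, List.range_eq_range', ← K3 n n 0 (by omega), List.map_flatMap]
    apply List.flatMap_congr
    intro i _
    rw [castsucc, pyRange_cast (i+1) n, List.flatMap_map, List.map_flatMap]
    apply List.flatMap_congr
    intro j _
    rw [castsucc, pyRange_cast (j+1) n, List.map_map, List.map_map]
    apply List.map_congr_left
    intro k _
    simp [gPair, pvMask, Int.shiftLeft_eq', Int.one_shiftLeft, List.getD]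
    try push_cast
    try ring
  have hp4 : (PySem.List.pyRange 0 (n : Int) 1).flatMap (fun i =>
      (PySem.List.pyRange (i + 1) (n : Int) 1).flatMap (fun j =>
        (PySem.List.pyRange (j + 1) (n : Int) 1).flatMap (fun k =>
          (PySem.List.pyRange (k + 1) (n : Int) 1).map (fun l =>
            ((1 : Int) <<< i + (1 : Int) <<< j + (1 : Int) <<< k + (1 : Int) <<< l,
             [PySem.List.pyGetD splitName i "", PySem.List.pyGetD splitName j "",
              PySem.List.pyGetD splitName k "", PySem.List.pyGetD splitName l ""])))))
      = (pvCombos (List.range n) 4).map (gPair splitName) := by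
    rw [show ((0:Int)) = ((0:Nat) : Int) by norm_num, pyRange_cast 0 n, List.flatMap_map,
        Nat.sub_zero, List.range_eq_range', ← K4 n n 0 (by omega), List.map_flatMap]
    apply List.flatMap_congr
    intro i _
    rw [castsucc, pyRange_cast (i+1) n, List.flatMap_map, List.map_flatMap]
    apply List.flatMap_congr
    intro j _
    rw [castsucc, pyRange_cast (j+1) n, List.flatMap_map, List.map_flatMap]
    apply List.flatMap_congr
    intro k _
    rw [castsucc, pyRange_cast (k+1) n, List.map_map, List.map_map]
    apply List.map_congr_left
    intro l _
    simp [gPair, pvMask, Int.shiftLeft_eq', Int.one_shiftLeft, List.getD]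
    try push_cast
    try ring
  have hnd : (List.range n).Nodup := List.nodup_range
  have hmemgm : ∀ m, m ∈ goodMasks n ↔ (m < 2 ^ n ∧ (pc m n < 5 ∧ pc m n > 1)) := by
    intro m
    simp [goodMasks, List.mem_filter, List.mem_range]
  have hkey : ∀ m ∈ goodMasks n, pvMask (idxOf m n) = (m : Int) := by
    intro m hm
    rw [pvMask_eq, maskN_idxOf m n ((hmemgm m).mp hm).1]
  have hmemc : ∀ c, c ∈ pvCombos (List.range n) 2 ++ (pvCombos (List.range n) 3 ++ pvCombos (List.range n) 4)
      ↔ (c.Sublist (List.range n) ∧ (c.length = 2 ∨ c.length = 3 ∨ c.length = 4)) := by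
    intro c
    simp only [List.mem_append, mem_pvCombos]
    tauto
  have hnodc : (pvCombos (List.range n) 2 ++ (pvCombos (List.range n) 3 ++ pvCombos (List.range n) 4)).Nodup := by
    apply List.Nodup.append (nodup_pvCombos _ _ hnd)
    · apply List.Nodup.append (nodup_pvCombos _ _ hnd) (nodup_pvCombos _ _ hnd)
      intro x h3 h4
      have := ((mem_pvCombos x _ 3).mp h3).2
      have := ((mem_pvCombos x _ 4).mp h4).2
      omega
    · intro x h2 h34
      have := ((mem_pvCombos x _ 2).mp h2).2
      rcases List.mem_append.mp h34 with h | h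
      · have := ((mem_pvCombos x _ 3).mp h).2; omega
      · have := ((mem_pvCombos x _ 4).mp h).2; omega
  have hpair : ((goodMasks n).map (fun m => idxOf m n)).Pairwise
      (fun a b => pvMask a < pvMask b) := by
    rw [List.pairwise_map]
    have hlt : (goodMasks n).Pairwise (· < ·) :=
      List.pairwise_lt_range.sublist List.filter_sublist
    refine List.Pairwise.imp_of_mem ?_ hlt
    intro a b ha hb hab
    rw [hkey a ha, hkey b hb]
    exact_mod_cast hab
  have hnodgm : ((goodMasks n).map (fun m => idxOf m n)).Nodup :=
    hpair.imp (fun h => by intro heq; subst heq; exact absurd h (lt_irrefl _))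
  have hperm : ((goodMasks n).map (fun m => idxOf m n)).Perm
      (pvCombos (List.range n) 2 ++ (pvCombos (List.range n) 3 ++ pvCombos (List.range n) 4)) := by
    rw [List.perm_ext_iff_of_nodup hnodgm hnodc]
    intro c
    rw [hmemc c]
    constructor
    · intro hc
      obtain ⟨m, hm, rfl⟩ := List.mem_map.mp hc
      refine ⟨List.filter_sublist, ?_⟩
      have hpc := ((hmemgm m).mp hm).2
      have hlen : (idxOf m n).length = pc m n := rfl
      omega
    · rintro ⟨hs, hl⟩
      apply List.mem_map.mpr
      refine ⟨maskN c, ?_, idxOf_maskN c n hs⟩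
      rw [hmemgm]
      refine ⟨maskN_lt c n hs, ?_⟩
      rw [pc_maskN c n hs]
      omega
  have hpairg : (((goodMasks n).map (fun m => idxOf m n)).map (gPair splitName)).Pairwise
      (fun a b => a.1 < b.1) := by
    rw [List.pairwise_map]
    exact hpair.imp (fun h => by simpa [gPair] using h)
  have hpermg : (((goodMasks n).map (fun m => idxOf m n)).map (gPair splitName)).Perm
      ((pvCombos (List.range n) 2 ++ (pvCombos (List.range n) 3 ++ pvCombos (List.range n) 4)).map (gPair splitName)) :=
    hperm.map _
  have hsorted : PySem.List.sorted
      ((pvCombos (List.range n) 2 ++ (pvCombos (List.range n) 3 ++ pvCombos (List.range n) 4)).map (gPair splitName))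
      (fun p => p.1) false
      = ((goodMasks n).map (fun m => idxOf m n)).map (gPair splitName) :=
    PySem.List.sorted_eq_of_perm_of_pairwise_lt _ _ _ hpermg hpairg
  simp only [long_name_alt, PySem.List.len_eq, ← hn]
  rw [hp2, hp3, hp4, ← List.map_append, ← List.map_append, List.append_assoc, hsorted]
  rw [List.map_map, List.map_map]
  apply List.map_congr_left
  intro m _
  simp [gPair, subF, Function.comp, List.getD]
  rfl

-- ===== VERDICT (by name: the statement is the Claim_ definition above) =====
theorem long_name_spec : Claim_equal_long_name := by
  intro splitName _
  unfold Spec_long_name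
  rw [A_eq, B_eq]
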